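-- pv_equiv track=rewrite | github.com/timt99/Genomic-Data-science | approximatematch.py | naive_approx_hamming
-- ===== SOURCE A (Python) =====
-- def naive_approx_hamming(p, t, maxHammingDistance=1):
--     occurrences = []
--     for i in range(0, len(t) - len(p) + 1): # for all alignments
--         nmm = 0
--         for j in range(0, len(p)):          # for all characters
--             if t[i+j] != p[j]:               # does it match?
--                 nmm += 1                     # mismatch
--                 if nmm > maxHammingDistance:
--                     break                    # exceeded maximum distance
--         if nmm <= maxHammingDistance:
--             # approximate match; return pair where first element is the
--             # offset of the match and second is the Hamming distance
--             occurrences.append((i, nmm))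
--     return occurrences
-- ===== SOURCE B (Python) =====
-- def naive_approx_hamming(p, t, maxHammingDistance=1):
--     # Transposed scan: walk the pattern positions once, accumulating per-alignment
--     # mismatch counts in an array, then filter by the threshold.
--     w = len(t) - len(p) + 1
--     if w <= 0:
--         return []
--     counts = [0] * w
--     for j in range(len(p)):
--         pj = p[j]
--         for i in range(w):
--             if t[i + j] != pj:
--                 counts[i] += 1
--     return [(i, c) for i, c in enumerate(counts) if c <= maxHammingDistance]
-- ===== Notes on version B (the rewrite author's own statement) =====
-- stated objective: alternative
-- what changed: Replaced A's per-alignment row scan with an early break by a transposed column-wise pass: one counts array accumulates every alignment's full Hamming distance (one loop over pattern positions, incrementing counts for all alignments), then a single enumerate+filter applies the threshold.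
import Mathlib
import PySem

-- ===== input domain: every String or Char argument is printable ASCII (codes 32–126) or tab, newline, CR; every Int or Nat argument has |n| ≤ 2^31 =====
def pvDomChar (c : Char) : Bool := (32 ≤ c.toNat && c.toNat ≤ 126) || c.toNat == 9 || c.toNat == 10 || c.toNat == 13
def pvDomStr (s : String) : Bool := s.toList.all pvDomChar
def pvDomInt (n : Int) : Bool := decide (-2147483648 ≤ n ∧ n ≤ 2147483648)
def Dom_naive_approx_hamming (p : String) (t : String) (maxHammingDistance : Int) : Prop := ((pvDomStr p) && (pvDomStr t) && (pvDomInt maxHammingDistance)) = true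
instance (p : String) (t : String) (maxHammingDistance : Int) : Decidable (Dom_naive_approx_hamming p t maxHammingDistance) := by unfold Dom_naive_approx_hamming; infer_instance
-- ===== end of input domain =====

-- B replaces A's row-wise scan with early break by a column-wise accumulation of all
-- per-alignment mismatch counts followed by a threshold filter (alternative, same cost).

-- ===== PORT A =====
-- inner 'for j in range(0, len(p))' with the break modeled as returning nmm immediately
def pvInnerA (pl tl : List Char) (k i : Int) : List Int → Int → Int
  | [], nmm => nmm
  | j :: js, nmm =>
    if PySem.List.pyGet? tl (i + j) ≠ PySem.List.pyGet? pl j then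
      if nmm + 1 > k then nmm + 1
      else pvInnerA pl tl k i js (nmm + 1)
    else pvInnerA pl tl k i js nmm

def naive_approx_hamming (p : String) (t : String) (maxHammingDistance : Int) : List (Int × Int) :=
  let pl := p.toList
  let tl := t.toList
  (PySem.List.pyRange 0 ((tl.length : Int) - (pl.length : Int) + 1) 1).foldl
    (fun occurrences i =>
      let nmm := pvInnerA pl tl maxHammingDistance i (PySem.List.pyRange 0 (pl.length : Int) 1) 0
      if nmm ≤ maxHammingDistance then occurrences ++ [(i, nmm)] else occurrences)
    []

-- ===== PORT B =====
def naive_approx_hamming_alt (p : String) (t : String) (maxHammingDistance : Int) : List (Int × Int) :=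
  let pl := p.toList
  let tl := t.toList
  let w : Int := (tl.length : Int) - (pl.length : Int) + 1
  if w ≤ 0 then []
  else
    let counts :=
      (PySem.List.pyRange 0 (pl.length : Int) 1).foldl
        (fun counts j =>
          let pj := PySem.List.pyGet? pl j
          -- the 'for i in range(w)' loop updates each slot counts[i] exactly once, in order
          counts.mapIdx (fun i c => if PySem.List.pyGet? tl ((i : Int) + j) ≠ pj then c + 1 else c))
        (List.replicate w.toNat 0)
    (PySem.List.enumerate counts 0).filter (fun ic => ic.2 ≤ maxHammingDistance)

-- ===== PRECONDITION & SPEC =====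
def Spec_naive_approx_hamming (p : String) (t : String) (maxHammingDistance : Int) (out : List (Int × Int)) : Prop := out = naive_approx_hamming_alt p t maxHammingDistance
instance (p : String) (t : String) (maxHammingDistance : Int) (out : List (Int × Int)) : Decidable (Spec_naive_approx_hamming p t maxHammingDistance out) := by unfold Spec_naive_approx_hamming; infer_instance

-- ===== CLAIM (what is proved, stated in full; the proofs are below) =====
def Claim_equal_naive_approx_hamming : Prop := ∀ (p : String) (t : String) (maxHammingDistance : Int), Dom_naive_approx_hamming p t maxHammingDistance → Spec_naive_approx_hamming p t maxHammingDistance (naive_approx_hamming p t maxHammingDistance)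

-- ===== LEMMAS AND PROOFS =====

-- full Hamming-mismatch count of alignment i over the pattern positions js
def pvMsum (pl tl : List Char) (i : Int) : List Int → Int
  | [] => 0
  | j :: js => (if PySem.List.pyGet? tl (i + j) ≠ PySem.List.pyGet? pl j then 1 else 0) + pvMsum pl tl i js

lemma pvMsum_nonneg (pl tl : List Char) (i : Int) (js : List Int) : 0 ≤ pvMsum pl tl i js := by
  induction js with
  | nil => simp [pvMsum]
  | cons j js ih => simp only [pvMsum]; split <;> omega

lemma pvInnerA_spec (pl tl : List Char) (k i : Int) (js : List Int) :
    ∀ nmm : Int,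
      (nmm + pvMsum pl tl i js ≤ k → pvInnerA pl tl k i js nmm = nmm + pvMsum pl tl i js) ∧
      (k < nmm + pvMsum pl tl i js → k < pvInnerA pl tl k i js nmm) := by
  induction js with
  | nil => intro nmm; simp [pvInnerA, pvMsum]
  | cons j js ih =>
    intro nmm
    simp only [pvInnerA, pvMsum]
    have hms := pvMsum_nonneg pl tl i js
    split
    · split
      · constructor
        · intro h; omega
        · intro _; omega
      · have := ih (nmm + 1)
        constructor
        · intro h; rw [this.1 (by omega)]; ring
        · intro h; exact this.2 (by omega)
    · have := ih nmm
      constructor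
      · intro h; rw [this.1 (by omega)]; omega
      · intro h; exact this.2 (by omega)

-- the common normal form both ports are reduced to
def pvTarget (pl tl : List Char) (k : Int) : List (Int × Int) :=
  ((PySem.List.pyRange 0 ((tl.length : Int) - (pl.length : Int) + 1) 1).filter
     (fun i => pvMsum pl tl i (PySem.List.pyRange 0 (pl.length : Int) 1) ≤ k)).map
    (fun i => (i, pvMsum pl tl i (PySem.List.pyRange 0 (pl.length : Int) 1)))

lemma A_eq_target (p t : String) (k : Int) :
    naive_approx_hamming p t k = pvTarget p.toList t.toList k := by
  unfold naive_approx_hamming pvTarget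
  dsimp only
  set pl := p.toList
  set tl := t.toList
  set J := PySem.List.pyRange 0 (pl.length : Int) 1 with hJ
  have hfun : (fun (occurrences : List (Int × Int)) (i : Int) =>
      let nmm := pvInnerA pl tl k i J 0
      if nmm ≤ k then occurrences ++ [(i, nmm)] else occurrences) =
      (fun occurrences i =>
        if (fun i => decide (pvInnerA pl tl k i J 0 ≤ k)) i = true then
          occurrences ++ [(fun i => (i, pvInnerA pl tl k i J 0)) i] else occurrences) := by
    funext occ i; simp
  rw [hfun, PySem.List.foldl_append_if]
  simp only [List.nil_append]
  have hpred : ∀ i : Int,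
      (decide (pvInnerA pl tl k i J 0 ≤ k)) = (decide (pvMsum pl tl i J ≤ k)) := by
    intro i
    have h := pvInnerA_spec pl tl k i J 0
    by_cases hc : pvMsum pl tl i J ≤ k
    · rw [h.1 (by omega)]; simp [hc]
    · have := h.2 (by omega)
      simp [hc]; omega
  rw [List.filter_congr (fun i _ => hpred i)]
  apply List.map_congr_left
  intro i hi
  have hc : pvMsum pl tl i J ≤ k := by
    have := List.of_mem_filter hi
    simpa using this
  have := (pvInnerA_spec pl tl k i J 0).1 (by omega)
  simp [this]

lemma counts_fold (pl tl : List Char) (js : List Int) :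
    ∀ init : List Int,
      js.foldl
        (fun counts j =>
          counts.mapIdx (fun i c =>
            if PySem.List.pyGet? tl ((i : Int) + j) ≠ PySem.List.pyGet? pl j then c + 1 else c))
        init =
      init.mapIdx (fun i c => c + pvMsum pl tl (i : Int) js) := by
  induction js with
  | nil =>
    intro init
    simp only [List.foldl_nil, pvMsum]
    apply List.ext_getElem <;> simp
  | cons j js ih =>
    intro init
    simp only [List.foldl_cons]
    rw [ih]
    rw [List.mapIdx_mapIdx]
    apply List.ext_getElem
    · simp
    · intro n h1 h2
      simp only [List.getElem_mapIdx, Function.comp, pvMsum]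
      split <;> ring

lemma enumerate_append (l1 l2 : List Int) :
    ∀ s : Int, PySem.List.enumerate (l1 ++ l2) s =
      PySem.List.enumerate l1 s ++ PySem.List.enumerate l2 (s + l1.length) := by
  induction l1 with
  | nil => intro s; simp [PySem.List.enumerate_nil]
  | cons x xs ih =>
    intro s
    simp only [List.cons_append, PySem.List.enumerate_cons, List.length_cons]
    rw [ih (s + 1)]
    have : s + 1 + (xs.length : Int) = s + ((xs.length + 1 : Nat) : Int) := by push_cast; ring
    rw [this]

lemma enumerate_map_range (g : Nat → Int) (n : Nat) :
    ∀ s : Int, PySem.List.enumerate ((List.range n).map g) s =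
      (List.range n).map (fun i : Nat => (s + (i : Int), g i)) := by
  induction n with
  | zero => intro s; simp [PySem.List.enumerate_nil]
  | succ n ih =>
    intro s
    rw [List.range_succ, List.map_append, enumerate_append, ih]
    simp [PySem.List.enumerate_cons, PySem.List.enumerate_nil]

lemma B_eq_target (p t : String) (k : Int) :
    naive_approx_hamming_alt p t k = pvTarget p.toList t.toList k := by
  unfold naive_approx_hamming_alt pvTarget
  dsimp only
  set pl := p.toList
  set tl := t.toList
  set J := PySem.List.pyRange 0 (pl.length : Int) 1 with hJ
  set w : Int := (tl.length : Int) - (pl.length : Int) + 1 with hw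
  by_cases h0 : w ≤ 0
  · rw [if_pos h0, PySem.List.pyRange_one_eq_nil h0]
    simp
  · rw [if_neg h0, counts_fold]
    have hcounts : (List.replicate w.toNat (0:Int)).mapIdx
        (fun i c => c + pvMsum pl tl (i : Int) J) =
        (List.range w.toNat).map (fun i : Nat => pvMsum pl tl (i : Int) J) := by
      apply List.ext_getElem <;> simp
    rw [hcounts, enumerate_map_range]
    rw [PySem.List.pyRange_one 0 w]
    simp only [zero_add, Int.sub_zero]
    rw [List.filter_map, List.filter_map]
    simp [Function.comp_def]

-- ===== VERDICT (by name: the statement is the Claim_ definition above) =====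
theorem naive_approx_hamming_spec : Claim_equal_naive_approx_hamming := by
  intro p t k _
  unfold Spec_naive_approx_hamming
  rw [A_eq_target, B_eq_target]
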